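-- pv_equiv track=rewrite | github.com/Replicaf/cursopy | scripts/generate_commit_message.py | determine_scope
-- ===== SOURCE A (Python) =====
-- def determine_scope(paths: list[str]) -> str | None:
--     """Determine commit scope from changed file paths."""
--     if any(p.startswith('tipos/') for p in paths):
--         return 'tipos'
--     if any(p.startswith('.github/') for p in paths):
--         return 'ci'
--     if any(p.startswith('scripts/') for p in paths):
--         return 'scripts'
--     return None
-- ===== SOURCE B (Python) =====
-- def determine_scope(paths: list[str]) -> str | None:
--     """Determine commit scope from changed file paths."""
--     has_tipos = has_ci = has_scripts = False
--     for p in paths: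
--         if p.startswith('tipos/'):
--             has_tipos = True
--         elif p.startswith('.github/'):
--             has_ci = True
--         elif p.startswith('scripts/'):
--             has_scripts = True
--     if has_tipos:
--         return 'tipos'
--     if has_ci:
--         return 'ci'
--     if has_scripts:
--         return 'scripts'
--     return None
-- ===== Notes on version B (the rewrite author's own statement) =====
-- stated objective: alternative
-- what changed: Replaces A's three separate short-circuiting any() scans by a single pass collecting three booleans, with the priority decision made once after the loop.
import Mathlib
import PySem

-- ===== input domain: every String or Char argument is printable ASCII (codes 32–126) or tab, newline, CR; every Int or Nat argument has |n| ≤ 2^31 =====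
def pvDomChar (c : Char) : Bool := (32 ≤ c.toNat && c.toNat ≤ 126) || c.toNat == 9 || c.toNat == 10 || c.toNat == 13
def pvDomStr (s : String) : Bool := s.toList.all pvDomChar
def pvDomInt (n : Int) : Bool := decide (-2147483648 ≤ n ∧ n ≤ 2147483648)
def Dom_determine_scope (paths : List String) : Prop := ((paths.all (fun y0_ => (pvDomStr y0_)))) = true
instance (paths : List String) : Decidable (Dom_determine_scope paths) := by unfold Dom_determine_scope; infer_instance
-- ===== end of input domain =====

-- B replaces A's three short-circuiting any() scans with a single pass collecting
-- three booleans and a priority decision afterwards (objective: alternative).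

-- ===== PORT A =====
def determine_scope (paths : List String) : Option String :=
  if paths.any (fun p => PySem.Str.startswith p "tipos/") then some "tipos"
  else if paths.any (fun p => PySem.Str.startswith p ".github/") then some "ci"
  else if paths.any (fun p => PySem.Str.startswith p "scripts/") then some "scripts"
  else none

-- ===== PORT B =====
def determine_scope_altStep (acc : Bool × Bool × Bool) (p : String) : Bool × Bool × Bool :=
  if PySem.Str.startswith p "tipos/" then (true, acc.2.1, acc.2.2)
  else if PySem.Str.startswith p ".github/" then (acc.1, true, acc.2.2)
  else if PySem.Str.startswith p "scripts/" then (acc.1, acc.2.1, true)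
  else acc

def determine_scope_alt (paths : List String) : Option String :=
  let st := paths.foldl determine_scope_altStep (false, false, false)
  if st.1 then some "tipos"
  else if st.2.1 then some "ci"
  else if st.2.2 then some "scripts"
  else none

-- ===== PRECONDITION & SPEC =====
def Spec_determine_scope (paths : List String) (out : Option String) : Prop := out = determine_scope_alt paths
instance (paths : List String) (out : Option String) : Decidable (Spec_determine_scope paths out) := by unfold Spec_determine_scope; infer_instance

-- ===== CLAIM (what is proved, stated in full; the proofs are below) =====
def Claim_equal_determine_scope : Prop := ∀ (paths : List String), Dom_determine_scope paths → Spec_determine_scope paths (determine_scope paths)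

-- ===== LEMMAS AND PROOFS =====
lemma pvAnyCongrMem {α : Type} {l : List α} {p q : α → Bool} (h : ∀ a ∈ l, p a = q a) :
    l.any p = l.any q := by
  induction l with
  | nil => rfl
  | cons a t ih =>
    simp only [List.any_cons, h a (List.mem_cons_self), ih (fun b hb => h b (List.mem_cons_of_mem a hb))]
lemma determine_scope_fold_spec (paths : List String) (t c s : Bool) :
    paths.foldl determine_scope_altStep (t, c, s) =
      (t || paths.any (fun p => PySem.Str.startswith p "tipos/"),
       c || paths.any (fun p => !PySem.Str.startswith p "tipos/" && PySem.Str.startswith p ".github/"),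
       s || paths.any (fun p => !PySem.Str.startswith p "tipos/" && !PySem.Str.startswith p ".github/" && PySem.Str.startswith p "scripts/")) := by
  induction paths generalizing t c s with
  | nil => simp
  | cons p ps ih =>
    simp only [List.foldl_cons, List.any_cons, determine_scope_altStep]
    cases h1 : PySem.Str.startswith p "tipos/" <;>
      cases h2 : PySem.Str.startswith p ".github/" <;>
        cases h3 : PySem.Str.startswith p "scripts/" <;>
          simp [ih]

-- ===== VERDICT (by name: the statement is the Claim_ definition above) =====
theorem determine_scope_spec : Claim_equal_determine_scope := by
  intro paths _
  unfold Spec_determine_scope determine_scope determine_scope_alt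
  rw [determine_scope_fold_spec]
  simp only [Bool.false_or]
  cases hT : paths.any (fun p => PySem.Str.startswith p "tipos/") with
  | true => rfl
  | false =>
    have hT' : ∀ p ∈ paths, PySem.Str.startswith p "tipos/" = false := by
      simpa using hT
    have eC : paths.any (fun p => !PySem.Str.startswith p "tipos/" && PySem.Str.startswith p ".github/")
        = paths.any (fun p => PySem.Str.startswith p ".github/") :=
      pvAnyCongrMem (fun p hp => by have h := hT' p hp; simp at h ⊢; simp [h])
    cases hC : paths.any (fun p => PySem.Str.startswith p ".github/") with
    | true => rw [eC, hC]; rfl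
    | false =>
      have hC' : ∀ p ∈ paths, PySem.Str.startswith p ".github/" = false := by
        simpa using hC
      have eS : paths.any (fun p => !PySem.Str.startswith p "tipos/" && !PySem.Str.startswith p ".github/" && PySem.Str.startswith p "scripts/")
          = paths.any (fun p => PySem.Str.startswith p "scripts/") :=
        pvAnyCongrMem (fun p hp => by have h1 := hT' p hp; have h2 := hC' p hp; simp at h1 h2 ⊢; simp [h1, h2])
      rw [eC, eS, hC]
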